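-- pv_equiv track=rewrite | github.com/Diffeomorphisme/AOC-23 | day12/day12.py | check_that_records_match
-- ===== SOURCE A (Python) =====
-- def check_that_records_match(test_record, reference_record):
--     count = 0
--     groups = []
--     for spring in test_record:
--         if spring == "." and count > 0:
--             groups.append(count)
--             count = 0
--             continue
--         elif spring == "#":
--             count += 1
--     if count > 0:
--         groups.append(count)
--     return groups == reference_record
-- ===== SOURCE B (Python) =====
-- def check_that_records_match(test_record, reference_record):
--     # split on '.', count '#' per segment, keep non-empty groups
--     return [seg.count('#') for seg in ''.join(test_record).split('.') if '#' in seg] == reference_record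
-- ===== Notes on version B (the rewrite author's own statement) =====
-- stated objective: simpler
-- what changed: Replaces A's stateful accumulate-and-flush loop (running count + flush on '.'/end) with a two-stage split-on-'.'-then-count-'#' comprehension compared to the reference in one line.
import Mathlib
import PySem

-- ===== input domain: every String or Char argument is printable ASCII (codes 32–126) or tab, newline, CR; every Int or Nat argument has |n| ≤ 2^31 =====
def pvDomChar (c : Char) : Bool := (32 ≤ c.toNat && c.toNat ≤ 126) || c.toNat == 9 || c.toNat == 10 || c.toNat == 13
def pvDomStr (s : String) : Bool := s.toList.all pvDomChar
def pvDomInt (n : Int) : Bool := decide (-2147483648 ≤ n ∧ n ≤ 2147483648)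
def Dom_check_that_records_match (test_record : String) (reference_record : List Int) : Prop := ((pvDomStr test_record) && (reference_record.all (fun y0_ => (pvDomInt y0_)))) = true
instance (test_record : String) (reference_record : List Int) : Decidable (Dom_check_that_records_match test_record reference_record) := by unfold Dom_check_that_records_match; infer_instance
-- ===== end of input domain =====

-- B replaces A's stateful accumulate-and-flush loop with a split-on-'.'-then-count-'#'
-- comprehension; same result, simpler decomposition (no speed claim).

-- ===== PORT A =====
def check_that_records_match (test_record : String) (reference_record : List Int) : Bool :=
  -- the loop: state (count, groups); '.' with count > 0 flushes, '#' increments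
  let st := test_record.toList.foldl
    (fun (st : Int × List Int) spring =>
      if spring == '.' && decide (0 < st.1) then (0, st.2 ++ [st.1])
      else if spring == '#' then (st.1 + 1, st.2)
      else st) ((0 : Int), ([] : List Int))
  let groups := if 0 < st.1 then st.2 ++ [st.1] else st.2
  decide (groups = reference_record)

-- ===== PORT B =====
def check_that_records_match_alt (test_record : String) (reference_record : List Int) : Bool :=
  match PySem.Str.split? test_record "." with
  | some segs =>
      decide ((segs.filter (fun seg => PySem.Str.isIn "#" seg)).map
        (fun seg => (PySem.Str.count seg "#" : Int)) = reference_record)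
  | none => false  -- unreachable: the separator "." is non-empty

-- ===== PRECONDITION & SPEC =====
def Spec_check_that_records_match (test_record : String) (reference_record : List Int) (out : Bool) : Prop := out = check_that_records_match_alt test_record reference_record
instance (test_record : String) (reference_record : List Int) (out : Bool) : Decidable (Spec_check_that_records_match test_record reference_record out) := by unfold Spec_check_that_records_match; infer_instance

-- ===== CLAIM (what is proved, stated in full; the proofs are below) =====
def Claim_equal_check_that_records_match : Prop := ∀ (test_record : String) (reference_record : List Int), Dom_check_that_records_match test_record reference_record → Spec_check_that_records_match test_record reference_record (check_that_records_match test_record reference_record)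

-- ===== LEMMAS AND PROOFS =====

-- A's loop body, flush and final value, named for the proofs (definitionally A's code)
def pvStep (st : Int × List Int) (spring : Char) : Int × List Int :=
  if spring == '.' && decide (0 < st.1) then (0, st.2 ++ [st.1])
  else if spring == '#' then (st.1 + 1, st.2)
  else st

def pvFlush (st : Int × List Int) : List Int :=
  if 0 < st.1 then st.2 ++ [st.1] else st.2

-- B's group list on the pieces produced by the split
def pvGroups (segs : List (List Char)) : List Int :=
  (segs.filter (fun s => decide ('#' ∈ s))).map (fun s => (s.count '#' : Int))

-- structural model of Python's split('.') on a char list (cur = current piece, reversed)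
def pvSplit : List Char → List Char → List (List Char)
  | [], cur => [cur.reverse]
  | c :: t, cur => if c = '.' then cur.reverse :: pvSplit t [] else pvSplit t (c :: cur)

lemma pvCountGo (l : List Char) : ∀ (fuel acc : Nat), l.length ≤ fuel →
    PySem.Chars.count.go ['#'] fuel l acc = acc + l.count '#' := by
  induction l with
  | nil =>
    intro fuel acc _
    rw [PySem.Chars.count.go.eq_def]
    cases fuel <;> simp
  | cons c t ih =>
    intro fuel acc h
    cases fuel with
    | zero => simp at h
    | succ fuel =>
      rw [PySem.Chars.count.go.eq_def]
      simp only [List.length_cons] at h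
      split
      next h1 => omega
      next heq _ => simp at heq
      next x fuel1 hd tl hfu heq =>
        injection heq with h1 h2
        subst h1; subst h2
        by_cases hc : c = '#'
        · rw [if_pos (by simp [List.isPrefixOf, hc])]
          rw [show List.drop ['#'].length (c :: t) = t from by simp]
          rw [ih fuel1 _ (by omega)]
          simp [hc]
          omega
        · rw [if_neg (by simp [List.isPrefixOf]; exact fun h' => hc h'.symm)]
          rw [ih fuel1 _ (by omega)]
          simp [hc]

lemma pvCountHash (l : List Char) : PySem.Chars.count l ['#'] = l.count '#' := by
  unfold PySem.Chars.count
  simpa using pvCountGo l l.length 0 (le_refl _)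

lemma pvSplitGo (l : List Char) : ∀ (fuel : Nat) (cur : List Char) (acc : List (List Char)),
    l.length ≤ fuel →
    PySem.Chars.splitOn.go ['.'] fuel l cur acc = acc.reverse ++ pvSplit l cur := by
  induction l with
  | nil =>
    intro fuel cur acc _
    rw [PySem.Chars.splitOn.go.eq_def]
    cases fuel <;> simp [pvSplit]
  | cons c t ih =>
    intro fuel cur acc h
    cases fuel with
    | zero => simp at h
    | succ fuel =>
      rw [PySem.Chars.splitOn.go.eq_def]
      simp only [List.length_cons] at h
      split
      next h1 => omega
      next heq _ => simp at heq
      next cur2 acc2 fuel1 hd tl hfu heq =>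
        injection heq with h1 h2
        subst h1; subst h2
        by_cases hc : c = '.'
        · rw [if_pos (by simp [List.isPrefixOf, hc])]
          rw [show List.drop ['.'].length (c :: t) = t from by simp]
          rw [ih fuel1 _ _ (by omega)]
          simp [pvSplit, hc]
        · rw [if_neg (by simp [List.isPrefixOf]; exact fun h' => hc h'.symm)]
          rw [ih fuel1 _ _ (by omega)]
          simp [pvSplit, hc]

lemma pvSplitOnDot (l : List Char) : PySem.Chars.splitOn l ['.'] = pvSplit l [] := by
  unfold PySem.Chars.splitOn
  simpa using pvSplitGo l (l.length + 1) [] [] (by omega)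

lemma pvIsInHash (l : List Char) : PySem.Chars.isIn ['#'] l = decide ('#' ∈ l) := by
  by_cases h : '#' ∈ l
  · rw [(PySem.Chars.isIn_iff_infix _ _).mpr]
    · simp [h]
    · obtain ⟨s₁, s₂, rfl⟩ := List.append_of_mem h
      exact ⟨s₁, s₂, by simp⟩
  · rw [(PySem.Chars.isIn_eq_false_iff _ _).mpr]
    · simp [h]
    · intro hin
      exact h (hin.subset (by simp))

-- the loop invariant: A's flushed fold equals B's per-piece groups, with the pending
-- piece cur (reversed) and the already-emitted groups g
lemma pvMain (cs : List Char) : ∀ (cur : List Char) (g : List Int),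
    pvFlush (cs.foldl pvStep (((cur.count '#' : Nat) : Int), g)) = g ++ pvGroups (pvSplit cs cur) := by
  induction cs with
  | nil =>
    intro cur g
    by_cases h : '#' ∈ cur
    · have hc : 0 < cur.count '#' := List.count_pos_iff.mpr h
      simp [pvFlush, pvGroups, pvSplit, h, hc]
    · have hc : cur.count '#' = 0 := by
        simpa using List.count_eq_zero_of_not_mem h
      simp [pvFlush, pvGroups, pvSplit, h, hc]
  | cons c t ih =>
    intro cur g
    rw [List.foldl_cons]
    by_cases hc : c = '.'
    · subst hc
      by_cases h : '#' ∈ cur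
      · rw [show pvStep (((cur.count '#' : Nat) : Int), g) '.' = (0, g ++ [((cur.count '#' : Nat) : Int)]) from by
          simp [pvStep, h]]
        rw [show ((0 : Int), g ++ [((cur.count '#' : Nat) : Int)]) = (((([] : List Char).count '#' : Nat) : Int), g ++ [((cur.count '#' : Nat) : Int)]) from by simp]
        rw [ih [] (g ++ [((cur.count '#' : Nat) : Int)])]
        simp [pvSplit, pvGroups, h]
      · have hz : cur.count '#' = 0 := by simpa using List.count_eq_zero_of_not_mem h
        rw [show pvStep (((cur.count '#' : Nat) : Int), g) '.' = (((cur.count '#' : Nat) : Int), g) from by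
          simp [pvStep, hz]]
        rw [show ((((cur.count '#' : Nat) : Nat) : Int), g) = (((([] : List Char).count '#' : Nat) : Int), g) from by simp [hz]]
        rw [ih [] g]
        simp [pvSplit, pvGroups, h]
    · by_cases hh : c = '#'
      · subst hh
        rw [show pvStep (((cur.count '#' : Nat) : Int), g) '#' = ((((('#' :: cur).count '#' : Nat)) : Int), g) from by
          simp [pvStep]]
        rw [ih ('#' :: cur) g]
        rw [show pvSplit t ('#' :: cur) = pvSplit ('#' :: t) cur from by simp [pvSplit]]
      · rw [show pvStep (((cur.count '#' : Nat) : Int), g) c = (((((c :: cur).count '#' : Nat)) : Int), g) from by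
          simp [pvStep, hc, hh]]
        rw [ih (c :: cur) g]
        rw [show pvSplit t (c :: cur) = pvSplit (c :: t) cur from by simp [pvSplit, hc]]

-- ===== VERDICT (by name: the statement is the Claim_ definition above) =====
theorem check_that_records_match_spec : Claim_equal_check_that_records_match := by
  intro tr ref _
  unfold Spec_check_that_records_match
  have hA : check_that_records_match tr ref
      = decide (pvFlush (tr.toList.foldl pvStep ((0 : Int), [])) = ref) := rfl
  have hsplit : PySem.Str.split? tr "." =
      some ((PySem.Chars.splitOn tr.toList ['.']).map String.ofList) := by
    simp [PySem.Str.split?, PySem.Chars.split?]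
  have hB : check_that_records_match_alt tr ref
      = decide ((((PySem.Chars.splitOn tr.toList ['.']).map String.ofList).filter
          (fun seg => PySem.Str.isIn "#" seg)).map
          (fun seg => (PySem.Str.count seg "#" : Int)) = ref) := by
    unfold check_that_records_match_alt
    rw [hsplit]
  rw [hA, hB]
  have hlist : (((PySem.Chars.splitOn tr.toList ['.']).map String.ofList).filter
        (fun seg => PySem.Str.isIn "#" seg)).map
        (fun seg => (PySem.Str.count seg "#" : Int))
      = pvGroups (pvSplit tr.toList []) := by
    rw [pvSplitOnDot, List.filter_map, List.map_map]
    unfold pvGroups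
    have h1 : ((fun seg => PySem.Str.isIn "#" seg) ∘ String.ofList)
        = (fun s : List Char => decide ('#' ∈ s)) :=
      funext fun s => by simp [PySem.Str.isIn_eq, pvIsInHash]
    have h2 : ((fun seg => (PySem.Str.count seg "#" : Int)) ∘ String.ofList)
        = (fun s : List Char => (s.count '#' : Int)) :=
      funext fun s => by simp [PySem.Str.count_eq, pvCountHash]
    rw [h1, h2]
  rw [hlist]
  have := pvMain tr.toList [] []
  simp only [List.count_nil, Nat.cast_zero, List.nil_append] at this
  rw [this]
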